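-- pv_equiv track=rewrite | github.com/imbelfort/Segundo-Parcial-Sw1 | generate_springboot.py | find_display_attribute
-- ===== SOURCE A (Python) =====
-- def find_display_attribute(entity):
--     """
--     Intenta adivinar el mejor atributo para mostrar en un dropdown o lista.
--     Busca en orden de prioridad.
--     """
--     attr_names = [attr['name'] for attr in entity.get('attributes', [])]
--
--     # Lista de prioridades (puedes añadir más si quieres)
--     priority_list = [
--         'nombre', 'name',
--         'descripcion', 'description',
--         'titulo', 'title',
--         'sku', 'codigo', 'username'
--     ]
--
--     # 1. Buscar en la lista de prioridades
--     for name in priority_list: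
--         if name in attr_names:
--             return name
--
--     # 2. Si no se encuentra, usar el segundo atributo
--     #    (asumiendo que el primero es 'id')
--     if len(attr_names) > 1:
--         return attr_names[1]
--
--     # 3. Como último recurso, usar 'id'
--     return 'id'
-- ===== SOURCE B (Python) =====
-- def find_display_attribute(entity):
--     """
--     Intenta adivinar el mejor atributo para mostrar en un dropdown o lista.
--     Busca en orden de prioridad.
--     """
--     priority_index = {name: i for i, name in enumerate([
--         'nombre', 'name',
--         'descripcion', 'description',
--         'titulo', 'title',
--         'sku', 'codigo', 'username'
--     ])}
--
--     attr_names = [attr['name'] for attr in entity.get('attributes', [])]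
--
--     # Single pass over the data: keep the attribute with the smallest
--     # priority index (strict < so the earliest such attribute wins).
--     best = None  # (name, priority position)
--     for name in attr_names:
--         i = priority_index.get(name)
--         if i is not None and (best is None or i < best[1]):
--             best = (name, i)
--     if best is not None:
--         return best[0]
--
--     # Fallbacks, as before.
--     if len(attr_names) > 1:
--         return attr_names[1]
--     return 'id'
-- ===== Notes on version B (the rewrite author's own statement) =====
-- stated objective: alternative
-- what changed: Inverts the traversal: instead of scanning the fixed priority list and testing membership in the attribute names for each entry, B builds a name-to-position index once and makes a single pass over the entity's attribute names tracking the one with the smallest priority index; fallbacks unchanged.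
import Mathlib
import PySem

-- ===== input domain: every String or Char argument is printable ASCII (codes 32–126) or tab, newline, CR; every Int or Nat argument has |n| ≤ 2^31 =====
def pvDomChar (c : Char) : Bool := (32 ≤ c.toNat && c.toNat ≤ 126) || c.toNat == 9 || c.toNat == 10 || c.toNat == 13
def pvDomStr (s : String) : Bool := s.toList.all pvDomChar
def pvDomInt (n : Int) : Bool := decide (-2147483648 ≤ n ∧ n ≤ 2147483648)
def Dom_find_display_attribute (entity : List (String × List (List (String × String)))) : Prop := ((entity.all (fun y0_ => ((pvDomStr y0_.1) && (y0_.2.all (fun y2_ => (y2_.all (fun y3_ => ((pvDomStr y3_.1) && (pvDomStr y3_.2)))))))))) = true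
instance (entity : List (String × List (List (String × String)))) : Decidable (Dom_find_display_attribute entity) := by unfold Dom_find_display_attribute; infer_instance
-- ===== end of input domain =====

-- B inverts A's traversal: a prebuilt name→position index and one pass over the
-- attribute names tracking the smallest priority index, instead of scanning the
-- priority list and testing membership for each entry (objective: alternative).

-- shared helper: Python dict lookup on an association list (first match)
def pvAssocGet? {α : Type} (d : List (String × α)) (k : String) : Option α :=
  (d.find? (fun p => p.1 == k)).map (·.2)

def pvAssocGetD {α : Type} (d : List (String × α)) (k : String) (dflt : α) : α :=
  (pvAssocGet? d k).getD dflt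

-- ===== PORT A =====
def pvPriorityList : List String :=
  ["nombre", "name", "descripcion", "description", "titulo", "title", "sku", "codigo", "username"]

-- attr['name'] raises KeyError when the key is missing; Pre_ excludes that, so the
-- "" default of getD is never used on admitted inputs.
def find_display_attribute (entity : List (String × List (List (String × String)))) : String :=
  let attr_names := (pvAssocGetD entity "attributes" []).map (fun attr => pvAssocGetD attr "name" "")
  match pvPriorityList.find? (fun name => attr_names.contains name) with
  | some name => name
  | none =>
      if attr_names.length > 1 then (PySem.List.pyGet? attr_names 1).getD "" else "id"

-- ===== PORT B =====
def pvPriorityIndex : List (String × Int) :=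
  [("nombre", 0), ("name", 1), ("descripcion", 2), ("description", 3), ("titulo", 4),
   ("title", 5), ("sku", 6), ("codigo", 7), ("username", 8)]

def pvBestStep (best : Option (String × Int)) (name : String) : Option (String × Int) :=
  match pvAssocGet? pvPriorityIndex name with
  | none => best
  | some i =>
      match best with
      | none => some (name, i)
      | some (bn, bi) => if i < bi then some (name, i) else some (bn, bi)

def find_display_attribute_alt (entity : List (String × List (List (String × String)))) : String :=
  let attr_names := (pvAssocGetD entity "attributes" []).map (fun attr => pvAssocGetD attr "name" "")
  match attr_names.foldl pvBestStep none with
  | some (bn, _) => bn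
  | none =>
      if attr_names.length > 1 then (PySem.List.pyGet? attr_names 1).getD "" else "id"

-- ===== PRECONDITION & SPEC =====
-- Pre_ excludes exactly the inputs where A raises KeyError: an attribute dict without a "name" key.
def Pre_find_display_attribute (entity : List (String × List (List (String × String)))) : Prop :=
  ((pvAssocGetD entity "attributes" []).all (fun attr => (pvAssocGet? attr "name").isSome)) = true

instance (entity : List (String × List (List (String × String)))) : Decidable (Pre_find_display_attribute entity) := by
  unfold Pre_find_display_attribute; infer_instance

def pvWitness_find_display_attribute : (List (String × List (List (String × String)))) :=
  [("attributes", [[("name", "titulo")], [("name", "codigo"), ("tipo", "int")]])]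

def Spec_find_display_attribute (entity : List (String × List (List (String × String)))) (out : String) : Prop := out = find_display_attribute_alt entity
instance (entity : List (String × List (List (String × String)))) (out : String) : Decidable (Spec_find_display_attribute entity out) := by unfold Spec_find_display_attribute; infer_instance

-- ===== CLAIM (what is proved, stated in full; the proofs are below) =====
def Claim_equal_find_display_attribute : Prop := ∀ (entity : List (String × List (List (String × String)))), Dom_find_display_attribute entity → Pre_find_display_attribute entity → Spec_find_display_attribute entity (find_display_attribute entity)

-- ===== LEMMAS AND PROOFS =====

-- "argmin with left preference" combination of two candidates
def pvMerge (a b : Option (String × Int)) : Option (String × Int) :=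
  match a, b with
  | none, b => b
  | some a, none => some a
  | some (n, i), some (m, j) => if j < i then some (m, j) else some (n, i)

def pvStepL (L : List (String × Int)) (acc : Option (String × Int)) (x : String) : Option (String × Int) :=
  pvMerge acc ((L.find? (fun p => p.1 == x)).map (fun p => (x, p.2)))

theorem pvMerge_assoc (a b c : Option (String × Int)) :
    pvMerge (pvMerge a b) c = pvMerge a (pvMerge b c) := by
  rcases a with _ | ⟨n, i⟩ <;> rcases b with _ | ⟨m, j⟩ <;> rcases c with _ | ⟨o, k⟩ <;>
    simp only [pvMerge] <;> split_ifs <;> simp only [pvMerge] <;> split_ifs <;>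
    first | rfl | omega

theorem pvBestStep_eq (acc : Option (String × Int)) (x : String) :
    pvBestStep acc x = pvStepL pvPriorityIndex acc x := by
  unfold pvBestStep pvStepL pvAssocGet?
  rcases h : pvPriorityIndex.find? (fun p => p.1 == x) with _ | ⟨n, i⟩ <;>
    rcases acc with _ | ⟨bn, bi⟩ <;> simp [h, pvMerge]

theorem pvFoldl_merge (L : List (String × Int)) (xs : List String) (acc : Option (String × Int)) :
    xs.foldl (pvStepL L) acc = pvMerge acc (xs.foldl (pvStepL L) none) := by
  induction xs generalizing acc with
  | nil => cases acc <;> rfl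
  | cons x xs ih =>
      simp only [List.foldl_cons]
      rw [ih (pvStepL L acc x), ih (pvStepL L none x)]
      show pvMerge (pvMerge acc _) _ = pvMerge acc (pvMerge (pvMerge none _) _)
      rw [pvMerge_assoc]
      rfl

theorem pvFind?_cons_merge (x : String) (xs : List String) (L : List (String × Int)) :
    L.Pairwise (fun p q => p.2 < q.2) →
    L.find? (fun p => (p.1 == x) || xs.contains p.1) =
      pvMerge ((L.find? (fun p => p.1 == x)).map (fun p => (x, p.2)))
        (L.find? (fun p => xs.contains p.1)) := by
  induction L with
  | nil => intro _; rfl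
  | cons hd tl ih =>
      obtain ⟨n, i⟩ := hd
      intro hL
      obtain ⟨hlt, htl⟩ := List.pairwise_cons.mp hL
      by_cases hn : n = x
      · subst hn
        clear ih
        by_cases hc : n ∈ xs
        · simp [List.find?_cons, hc, pvMerge]
        · rcases hfc : tl.find? (fun p => decide (p.1 ∈ xs)) with _ | ⟨m, j⟩
          · simp [List.find?_cons, hc, hfc, pvMerge]
          · have hij : i < j := hlt _ (List.mem_of_find?_eq_some hfc)
            simp [List.find?_cons, hc, hfc, pvMerge, not_lt.mpr hij.le]
      · by_cases hc : n ∈ xs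
        · clear ih
          rcases hfi : tl.find? (fun p => p.1 == x) with _ | ⟨m, k⟩
          · simp [List.find?_cons, hn, hc, hfi, pvMerge]
          · have hik : i < k := hlt _ (List.mem_of_find?_eq_some hfi)
            simp [List.find?_cons, hn, hc, hfi, pvMerge, hik]
        · have htail := ih htl
          simp only [List.find?_cons]
          rw [show ((n == x || xs.contains n : Bool)) = false by simp [hn, hc]]
          simp only [Bool.false_eq_true, if_false, show ((n == x : Bool)) = false by simp [hn],
            show (xs.contains n) = false by simp [hc]]
          exact htail

theorem pvFoldl_char (L : List (String × Int)) (hL : L.Pairwise (fun p q => p.2 < q.2))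
    (xs : List String) :
    xs.foldl (pvStepL L) none = L.find? (fun p => xs.contains p.1) := by
  induction xs with
  | nil =>
      symm
      rw [List.foldl_nil, List.find?_eq_none]
      intro p _
      simp
  | cons x xs ih =>
      rw [List.foldl_cons, pvFoldl_merge, ih]
      have hstep : pvStepL L none x = (L.find? (fun p => p.1 == x)).map (fun p => (x, p.2)) := rfl
      rw [hstep, ← pvFind?_cons_merge x xs L hL]
      rfl

theorem pvPriorityIndex_pairwise : pvPriorityIndex.Pairwise (fun p q => p.2 < q.2) := by
  decide

theorem pvPriorityList_eq : pvPriorityList = pvPriorityIndex.map Prod.fst := rfl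

-- ===== VERDICT (by name: the statement is the Claim_ definition above) =====
theorem find_display_attribute_spec : Claim_equal_find_display_attribute := by
  intro entity _ _
  unfold Spec_find_display_attribute
  simp only [find_display_attribute, find_display_attribute_alt]
  have hbest : (fun acc x => pvBestStep acc x) = pvStepL pvPriorityIndex := by
    funext acc x
    exact pvBestStep_eq acc x
  set attr_names := (pvAssocGetD entity "attributes" []).map (fun attr => pvAssocGetD attr "name" "") with hA
  rw [show attr_names.foldl pvBestStep none = attr_names.foldl (pvStepL pvPriorityIndex) none from by rw [← hbest],
      pvFoldl_char pvPriorityIndex pvPriorityIndex_pairwise,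
      pvPriorityList_eq, List.find?_map]
  rcases h : pvPriorityIndex.find? (fun p => attr_names.contains p.1) with _ | ⟨n, i⟩ <;>
    simp only [Function.comp_def, h, Option.map_some, Option.map_none]
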